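-- pv_equiv track=rewrite | github.com/Variably-Constant/Riemann-Hypothesis-Proof | code/RH_12_Trace_Derivation.py | is_prime_power
-- ===== SOURCE A (Python) =====
-- def is_prime_power(n):
--     """Check if n is a prime power and return (p, m) if so"""
--     if n < 2:
--         return None
--
--     # Find smallest prime factor
--     for p in range(2, n + 1):
--         if p * p > n:
--             # n is prime (no divisor found up to sqrt(n))
--             return (n, 1)
--
--         if n % p == 0:
--             # p is the smallest prime factor
--             # Check if n = p^m for some m
--             m = 0
--             temp = n
--             while temp % p == 0:
--                 temp //= p
--                 m += 1
--             if temp == 1: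
--                 return (p, m)  # n = p^m
--             else:
--                 return None  # n has multiple distinct prime factors
--
--     return None
-- ===== SOURCE B (Python) =====
-- def _iroot(n, e):
--     """Largest r >= 1 with r**e <= n (n >= 2, e >= 1)."""
--     if e == 1:
--         return n
--     r = 1
--     while (r + 1) ** e <= n:
--         r += 1
--     return r
--
--
-- def _is_prime(r):
--     if r < 2:
--         return False
--     d = 2
--     while d * d <= r:
--         if r % d == 0:
--             return False
--         d += 1
--     return True
--
--
-- def is_prime_power(n):
--     """Check if n is a prime power and return (p, m) if so"""
--     if n < 2:
--         return None
--     e = 1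
--     while 2 ** (e + 1) <= n:
--         e += 1
--     # e = floor(log2(n)); a prime power n = p**m has m <= e, and m is the
--     # largest exponent for which n is a perfect power with a prime root.
--     while e >= 1:
--         r = _iroot(n, e)
--         if r ** e == n and _is_prime(r):
--             return (r, e)
--         e -= 1
--     return None
-- ===== Notes on version B (the rewrite author's own statement) =====
-- stated objective: alternative
-- what changed: Replaces A's smallest-prime-factor trial division with stripping by a descending perfect-power enumeration: for e from floor(log2(n)) down to 1, take the integer e-th root r and return (r,e) iff r**e==n and r passes an independent trial-division primality test.
import Mathlib
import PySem

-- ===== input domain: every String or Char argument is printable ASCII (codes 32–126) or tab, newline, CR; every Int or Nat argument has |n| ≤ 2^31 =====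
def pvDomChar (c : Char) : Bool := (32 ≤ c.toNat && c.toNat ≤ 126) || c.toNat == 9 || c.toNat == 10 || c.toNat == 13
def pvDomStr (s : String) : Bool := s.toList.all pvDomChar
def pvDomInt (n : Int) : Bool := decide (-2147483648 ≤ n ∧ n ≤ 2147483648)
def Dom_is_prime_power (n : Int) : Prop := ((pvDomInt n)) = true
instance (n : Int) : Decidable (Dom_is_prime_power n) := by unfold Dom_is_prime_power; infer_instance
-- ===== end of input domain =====

-- B replaces A's smallest-factor trial division + stripping by a descending perfect-power
-- enumeration (integer e-th root + independent primality test); alternative algorithm, not faster.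


-- ===== PORT A =====
-- while temp % p == 0: temp //= p; m += 1   (fuel = temp.toNat suffices since p ≥ 2 halves temp)
def pyStrip : Nat → Int → Int → Int → Int × Int
  | 0, temp, _, m => (temp, m)
  | f+1, temp, p, m =>
    if PySem.Int.mod temp p = 0 then pyStrip f (PySem.Int.floordiv temp p) p (m+1)
    else (temp, m)

-- for p in range(2, n+1): … (fuel = number of remaining iterations)
def loopA (n : Int) : Nat → Int → Option (Int × Int)
  | 0, _ => none
  | f+1, p =>
    if p * p > n then some (n, 1)
    else if PySem.Int.mod n p = 0 then
      let r := pyStrip n.toNat n p 0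
      if r.1 = 1 then some (p, r.2) else none
    else loopA n f (p+1)

def is_prime_power (n : Int) : Option (Int × Int) :=
  if n < 2 then none else loopA n (n - 1).toNat 2

-- ===== PORT B =====
-- while (r+1)**e <= n: r += 1    (r**e ported as r ^ e.toNat; exact since e ≥ 1 here)
def irootGo (n e : Int) : Nat → Int → Int
  | 0, r => r
  | f+1, r => if (r+1) ^ e.toNat ≤ n then irootGo n e f (r+1) else r

def iroot (n e : Int) : Int := if e = 1 then n else irootGo n e n.toNat 1

-- d = 2; while d*d <= r: if r % d == 0: return False; d += 1; return True
def isPrimeGo (r : Int) : Nat → Int → Bool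
  | 0, _ => true
  | f+1, d =>
    if d * d ≤ r then (if PySem.Int.mod r d = 0 then false else isPrimeGo r f (d+1))
    else true

def isPrime (r : Int) : Bool := if r < 2 then false else isPrimeGo r r.toNat 2

-- e = 1; while 2**(e+1) <= n: e += 1
def elogGo (n : Int) : Nat → Int → Int
  | 0, e => e
  | f+1, e => if 2 ^ (e+1).toNat ≤ n then elogGo n f (e+1) else e

-- while e >= 1: r = _iroot(n, e); if r**e == n and _is_prime(r): return (r, e); e -= 1
def loopB (n : Int) : Nat → Int → Option (Int × Int)
  | 0, _ => none
  | f+1, e =>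
    if 1 ≤ e then
      let r := iroot n e
      if r ^ e.toNat = n ∧ isPrime r = true then some (r, e) else loopB n f (e-1)
    else none

def is_prime_power_alt (n : Int) : Option (Int × Int) :=
  if n < 2 then none
  else
    let e := elogGo n n.toNat 1
    loopB n (e.toNat + 1) e

-- ===== PRECONDITION & SPEC =====
def Spec_is_prime_power (n : Int) (out : Option (Int × Int)) : Prop := out = is_prime_power_alt n
instance (n : Int) (out : Option (Int × Int)) : Decidable (Spec_is_prime_power n out) := by unfold Spec_is_prime_power; infer_instance

-- ===== CLAIM (what is proved, stated in full; the proofs are below) =====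
def Claim_equal_is_prime_power : Prop := ∀ (n : Int), Dom_is_prime_power n → Spec_is_prime_power n (is_prime_power n)

-- ===== LEMMAS AND PROOFS =====

/-- Proof-side predicate: n is a prime power p^m with p prime and m ≥ 1. -/
def IsPP (n : Int) : Prop := ∃ (p m : ℕ), p.Prime ∧ 1 ≤ m ∧ n = (p : Int) ^ m

theorem strip_spec : ∀ (f : Nat) (t p m : Int), 2 ≤ p → 1 ≤ t → t ≤ (f : Int) →
    ∃ (k : ℕ) (t' : Int), pyStrip f t p m = (t', m + (k : Int)) ∧ t = t' * p ^ k ∧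
      ¬ (p ∣ t') ∧ 1 ≤ t' := by
  intro f
  induction f with
  | zero => intro t p m _ ht hf; exfalso; simp at hf; omega
  | succ f ih =>
    intro t p m hp ht hf
    by_cases hdvd : p ∣ t
    · have hmod : PySem.Int.mod t p = 0 := (PySem.Int.mod_eq_zero_iff_dvd t p).2 hdvd
      obtain ⟨c, hc⟩ := hdvd
      have hfd : PySem.Int.floordiv t p = c := by
        rw [PySem.Int.floordiv_eq_ediv_of_pos (by omega), hc]
        exact Int.mul_ediv_cancel_left c (by omega)
      have hc1 : 1 ≤ c := by nlinarith
      have hclt : c < t := by nlinarith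
      have hcf : c ≤ (f : Int) := by push_cast at hf ⊢; omega
      obtain ⟨k, t', heq, hrep, hnd, ht'⟩ := ih c p (m + 1) hp hc1 hcf
      refine ⟨k + 1, t', ?_, ?_, hnd, ht'⟩
      · simp only [pyStrip, hmod, if_pos, hfd]
        rw [heq]
        congr 1
        push_cast; ring
      · rw [hc, hrep]; ring
    · have hmod : ¬ PySem.Int.mod t p = 0 := by
        rw [PySem.Int.mod_eq_zero_iff_dvd]; exact hdvd
      refine ⟨0, t, ?_, by simp, hdvd, ht⟩
      simp only [pyStrip, if_neg hmod]
      simp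

theorem prime_of_no_small_divisor (n p : Int) (hn : 2 ≤ n) (hp : 2 ≤ p)
    (hnd : ∀ q : Int, 2 ≤ q → q < p → ¬ q ∣ n) (hlt : n < p * p) : n.toNat.Prime := by
  rw [Nat.prime_def_lt']
  refine ⟨by omega, ?_⟩
  intro a h2 halt hdvd
  obtain ⟨c, hc⟩ := hdvd
  have hnN : ((n.toNat : Int)) = n := Int.toNat_of_nonneg (by omega)
  have haltI : (a : Int) < n := by
    have : (a : Int) < (n.toNat : Int) := by exact_mod_cast halt
    omega
  have hcI : n = (a : Int) * (c : Int) := by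
    rw [← hnN]; exact_mod_cast hc
  have hc2N : 2 ≤ c := by
    rcases c with _ | c
    · simp at hc; omega
    · rcases c with _ | c
      · simp at hc; omega
      · omega
  have hc2 : 2 ≤ (c : Int) := by exact_mod_cast hc2N
  by_cases ha : (a : Int) < p
  · exact hnd (a : Int) (by exact_mod_cast h2) ha ⟨(c : Int), hcI⟩
  · push_neg at ha
    have hclt : (c : Int) < p := by nlinarith
    exact hnd (c : Int) hc2 hclt ⟨(a : Int), by rw [hcI]; ring⟩

theorem smallest_divisor_prime (n p : Int) (hn : 2 ≤ n) (hp : 2 ≤ p) (hd : p ∣ n)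
    (hnd : ∀ q : Int, 2 ≤ q → q < p → ¬ q ∣ n) : p.toNat.Prime := by
  rw [Nat.prime_def_lt']
  refine ⟨by omega, ?_⟩
  intro a h2 halt hdvda
  have hpN : ((p.toNat : Int)) = p := Int.toNat_of_nonneg (by omega)
  have hdvdp : (a : Int) ∣ p := by
    rw [← hpN]; exact_mod_cast hdvda
  refine hnd (a : Int) (by exact_mod_cast h2) ?_ (hdvdp.trans hd)
  have : (a : Int) < (p.toNat : Int) := by exact_mod_cast halt
  omega

theorem pow_unique {p r e m : ℕ} (hp : p.Prime) (hr : 2 ≤ r) (he : 1 ≤ e)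
    (h : r ^ e = p ^ m) : ∃ k, 1 ≤ k ∧ r = p ^ k ∧ k * e = m := by
  have hdvd : r ∣ p ^ m := h ▸ dvd_pow_self r (by omega : e ≠ 0)
  obtain ⟨k, _, hrk⟩ := (Nat.dvd_prime_pow hp).1 hdvd
  have hk1 : 1 ≤ k := by
    rcases Nat.eq_zero_or_pos k with h0 | h1
    · subst h0; simp at hrk; omega
    · exact h1
  refine ⟨k, hk1, hrk, Nat.pow_right_injective hp.two_le ?_⟩
  show p ^ (k * e) = p ^ m
  rw [pow_mul, ← hrk]
  exact h

theorem irootGo_spec (n e : Int) (hn : 2 ≤ n) (hE : 1 ≤ e.toNat) :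
    ∀ (f : Nat) (r : Int), 1 ≤ r → r ^ e.toNat ≤ n → n ≤ r + (f : Int) →
      1 ≤ irootGo n e f r ∧ (irootGo n e f r) ^ e.toNat ≤ n ∧
        n < (irootGo n e f r + 1) ^ e.toNat := by
  intro f
  induction f with
  | zero =>
    intro r hr hrle hfuel
    simp only [irootGo]
    refine ⟨hr, hrle, ?_⟩
    have h1 : r + 1 ≤ (r + 1) ^ e.toNat := le_self_pow₀ (by omega) (by omega)
    simp at hfuel
    omega
  | succ f ih =>
    intro r hr hrle hfuel
    simp only [irootGo]
    by_cases hcond : (r + 1) ^ e.toNat ≤ n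
    · rw [if_pos hcond]
      exact ih (r + 1) (by omega) hcond (by push_cast at hfuel ⊢; omega)
    · rw [if_neg hcond]
      exact ⟨hr, hrle, by omega⟩

theorem iroot_spec (n e : Int) (hn : 2 ≤ n) (he : 1 ≤ e) :
    1 ≤ iroot n e ∧ (iroot n e) ^ e.toNat ≤ n ∧ n < (iroot n e + 1) ^ e.toNat := by
  by_cases h1 : e = 1
  · subst h1
    have hi : iroot n 1 = n := by simp [iroot]
    rw [hi]
    simp only [Int.toNat_one, pow_one]
    omega
  · have hE : 1 ≤ e.toNat := by omega
    simp only [iroot, if_neg h1]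
    refine irootGo_spec n e hn hE n.toNat 1 le_rfl (by simp only [one_pow]; omega) ?_
    have : ((n.toNat : Int)) = n := Int.toNat_of_nonneg (by omega)
    omega

theorem isPrimeGo_spec (r : Int) (hr : 2 ≤ r) :
    ∀ (f : Nat) (d : Int), 2 ≤ d → r + 1 ≤ d + (f : Int) →
      (∀ q : Int, 2 ≤ q → q < d → ¬ q ∣ r) →
      (isPrimeGo r f d = true ↔ r.toNat.Prime) := by
  intro f
  induction f with
  | zero =>
    intro d hd hfuel hnd
    simp only [isPrimeGo]
    constructor
    · intro _
      rw [Nat.prime_def_lt']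
      refine ⟨by omega, ?_⟩
      intro a h2 halt hdvda
      have hrN : ((r.toNat : Int)) = r := Int.toNat_of_nonneg (by omega)
      have haltI : (a : Int) < r := by
        have : (a : Int) < (r.toNat : Int) := by exact_mod_cast halt
        omega
      refine hnd (a : Int) (by exact_mod_cast h2) (by simp at hfuel; omega) ?_
      rw [← hrN]; exact_mod_cast hdvda
    · intro _; trivial
  | succ f ih =>
    intro d hd hfuel hnd
    simp only [isPrimeGo]
    by_cases hdd : d * d ≤ r
    · rw [if_pos hdd]
      by_cases hdvd : d ∣ r
      · rw [if_pos ((PySem.Int.mod_eq_zero_iff_dvd r d).2 hdvd)]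
        have hdr : d < r := by nlinarith
        constructor
        · intro hco; exact absurd hco (by simp)
        · intro hprime
          exfalso
          have hrN : ((r.toNat : Int)) = r := Int.toNat_of_nonneg (by omega)
          have hdN : ((d.toNat : Int)) = d := Int.toNat_of_nonneg (by omega)
          refine (Nat.prime_def_lt'.1 hprime).2 d.toNat (by omega) (by omega) ?_
          rw [← hrN] at hdvd
          rw [← hdN] at hdvd
          exact_mod_cast hdvd
      · rw [if_neg (by rw [PySem.Int.mod_eq_zero_iff_dvd]; exact hdvd)]
        refine ih (d + 1) (by omega) (by push_cast at hfuel ⊢; omega) ?_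
        intro q h2 hq
        rcases lt_or_eq_of_le (by omega : q ≤ d) with h | h
        · exact hnd q h2 h
        · subst h; exact hdvd
    · rw [if_neg hdd]
      simp only [true_iff]
      exact prime_of_no_small_divisor r d hr hd hnd (by omega)

theorem isPrime_spec (r : Int) : isPrime r = true ↔ (2 ≤ r ∧ r.toNat.Prime) := by
  by_cases hr : r < 2
  · simp only [isPrime, if_pos hr]
    constructor
    · intro h; cases h
    · intro ⟨h, _⟩; omega
  · push_neg at hr
    simp only [isPrime, if_neg (by omega : ¬ r < 2)]
    rw [isPrimeGo_spec r hr r.toNat 2 le_rfl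
      (by have : ((r.toNat : Int)) = r := Int.toNat_of_nonneg (by omega); omega)
      (by intro q h2 hq _; omega)]
    constructor
    · intro h; exact ⟨hr, h⟩
    · intro ⟨_, h⟩; exact h

theorem elogGo_spec (n : Int) (hn : 2 ≤ n) :
    ∀ (f : Nat) (e : Int), 1 ≤ e → 2 ^ e.toNat ≤ n → n ≤ e + (f : Int) →
      1 ≤ elogGo n f e ∧ 2 ^ (elogGo n f e).toNat ≤ n ∧
        n < 2 ^ ((elogGo n f e) + 1).toNat := by
  intro f
  induction f with
  | zero =>
    intro e he hle hfuel
    simp only [elogGo]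
    refine ⟨he, hle, ?_⟩
    have hK : ((e.toNat : Int)) = e := Int.toNat_of_nonneg (by omega)
    have h1 : (e + 1).toNat = e.toNat + 1 := by omega
    rw [h1]
    have h2 : e.toNat + 1 < 2 ^ (e.toNat + 1) := Nat.lt_two_pow_self
    have h3 : ((e.toNat + 1 : ℕ) : Int) < ((2 ^ (e.toNat + 1) : ℕ) : Int) := by
      exact_mod_cast h2
    push_cast at h3
    simp at hfuel
    omega
  | succ f ih =>
    intro e he hle hfuel
    simp only [elogGo]
    by_cases hcond : 2 ^ (e + 1).toNat ≤ n
    · rw [if_pos hcond]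
      exact ih (e + 1) (by omega) hcond (by push_cast at hfuel ⊢; omega)
    · rw [if_neg hcond]
      exact ⟨he, hle, by omega⟩

theorem loopA_pos (n : Int) (p m : ℕ) (hp : p.Prime) (hm : 1 ≤ m) (hn : n = (p : Int) ^ m) :
    ∀ (f : Nat) (q : Int), 2 ≤ q → q ≤ (p : Int) →
      (∀ x : Int, 2 ≤ x → x < q → ¬ x ∣ n) → (p : Int) + 1 ≤ q + (f : Int) →
      loopA n f q = some ((p : Int), (m : Int)) := by
  have hP2 : (2 : Int) ≤ (p : Int) := by exact_mod_cast hp.two_le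
  have hn2 : 2 ≤ n := by
    rw [hn]
    calc (2 : Int) ≤ (p : Int) := hP2
    _ ≤ (p : Int) ^ m := le_self_pow₀ (by omega) (by omega)
  intro f
  induction f with
  | zero => intro q _ hqp _ hfuel; exfalso; simp at hfuel; omega
  | succ f ih =>
    intro q h2 hqp hnd hfuel
    simp only [loopA]
    by_cases hbig : q * q > n
    · rw [if_pos hbig]
      have hm1 : m = 1 := by
        by_contra hne
        have h2m : 2 ≤ m := by omega
        have : (p : Int) ^ 2 ≤ (p : Int) ^ m := pow_le_pow_right₀ (by omega) h2m
        have hqq : q * q ≤ (p : Int) * (p : Int) := mul_le_mul hqp hqp (by omega) (by omega)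
        rw [hn] at hbig
        nlinarith
      subst hm1
      rw [hn]
      norm_num
    · rw [if_neg hbig]
      by_cases hdvd : q ∣ n
      · have hqP : q = (p : Int) := by
          have hqN : ((q.toNat : Int)) = q := Int.toNat_of_nonneg (by omega)
          have hdvdN : q.toNat ∣ p ^ m := by
            have : q ∣ ((p : Int)) ^ m := hn ▸ hdvd
            rw [← hqN] at this
            exact_mod_cast this
          obtain ⟨k, _, hqk⟩ := (Nat.dvd_prime_pow hp).1 hdvdN
          have hk1 : 1 ≤ k := by
            rcases Nat.eq_zero_or_pos k with h0 | h1
            · subst h0; simp at hqk; omega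
            · exact h1
          have : p ≤ q.toNat := by
            rw [hqk]
            exact Nat.le_self_pow (by omega) p
          have : (p : Int) ≤ q := by omega
          omega
        rw [if_pos ((PySem.Int.mod_eq_zero_iff_dvd n q).2 hdvd)]
        obtain ⟨k', t', hstrip, hrep, hndvd, ht'⟩ :=
          strip_spec n.toNat n q 0 (by omega) (by omega)
            (by have : ((n.toNat : Int)) = n := Int.toNat_of_nonneg (by omega); omega)
        have htN : ((t'.toNat : Int)) = t' := Int.toNat_of_nonneg (by omega)
        have hrepN : t'.toNat * p ^ k' = p ^ m := by
          have : n = t' * (p : Int) ^ k' := by rw [hrep, hqP]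
          rw [hn] at this
          have := this.symm
          rw [← htN] at this
          exact_mod_cast this
        have hkm : k' ≤ m := by
          have : p ^ k' ∣ p ^ m := Dvd.intro_left _ hrepN
          exact (Nat.pow_dvd_pow_iff_le_right hp.one_lt).1 this
        have hTval : t'.toNat = p ^ (m - k') := by
          have hpow : p ^ m = p ^ (m - k') * p ^ k' := by
            rw [← pow_add]
            congr 1
            omega
          have hppos : 0 < p ^ k' := pow_pos (by omega) k'
          have := hrepN.trans hpow
          exact Nat.eq_of_mul_eq_mul_right hppos this
        have hmk : m = k' := by
          by_contra hne
          have h1 : 1 ≤ m - k' := by omega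
          have : p ∣ t'.toNat := by
            rw [hTval]
            exact dvd_pow_self p (by omega)
          have : q ∣ t' := by
            rw [hqP, ← htN]
            exact_mod_cast this
          exact hndvd this
        have ht1 : t' = 1 := by
          rw [← htN, hTval, hmk]
          simp
        rw [hstrip]
        simp only [ht1, if_pos rfl]
        rw [hqP, hmk]
        norm_num
      · rw [if_neg (by rw [PySem.Int.mod_eq_zero_iff_dvd]; exact hdvd)]
        have hPdvd : (p : Int) ∣ n := by
          rw [hn]
          exact dvd_pow_self _ (by omega)
        have hqne : q ≠ (p : Int) := by
          intro h; subst h; exact hdvd hPdvd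
        refine ih (q + 1) (by omega) (by omega) ?_ (by push_cast at hfuel ⊢; omega)
        intro x hx2 hxlt
        rcases lt_or_eq_of_le (by omega : x ≤ q) with h | h
        · exact hnd x hx2 h
        · subst h; exact hdvd

theorem loopA_neg (n : Int) (hn : 2 ≤ n) (h : ¬ IsPP n) :
    ∀ (f : Nat) (q : Int), 2 ≤ q → (∀ x : Int, 2 ≤ x → x < q → ¬ x ∣ n) →
      loopA n f q = none := by
  intro f
  induction f with
  | zero => intro q _ _; rfl
  | succ f ih =>
    intro q h2 hnd
    simp only [loopA]
    have hnN : ((n.toNat : Int)) = n := Int.toNat_of_nonneg (by omega)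
    by_cases hbig : q * q > n
    · exfalso
      have hprime := prime_of_no_small_divisor n q hn h2 hnd (by omega)
      exact h ⟨n.toNat, 1, hprime, le_rfl, by rw [pow_one, hnN]⟩
    · rw [if_neg hbig]
      by_cases hdvd : q ∣ n
      · rw [if_pos ((PySem.Int.mod_eq_zero_iff_dvd n q).2 hdvd)]
        obtain ⟨k', t', hstrip, hrep, hndvd, ht'⟩ :=
          strip_spec n.toNat n q 0 (by omega) (by omega) (by omega)
        have hk1 : 1 ≤ k' := by
          rcases Nat.eq_zero_or_pos k' with h0 | h1
          · exfalso
            subst h0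
            simp at hrep
            rw [← hrep] at hndvd
            exact hndvd hdvd
          · exact h1
        have ht1 : t' ≠ 1 := by
          intro heq
          have hqprime := smallest_divisor_prime n q hn h2 hdvd hnd
          have hqN : ((q.toNat : Int)) = q := Int.toNat_of_nonneg (by omega)
          refine h ⟨q.toNat, k', hqprime, hk1, ?_⟩
          rw [hqN, ← hrep.symm, heq, one_mul]
        rw [hstrip]
        simp only [if_neg ht1]
      · rw [if_neg (by rw [PySem.Int.mod_eq_zero_iff_dvd]; exact hdvd)]
        refine ih (q + 1) (by omega) ?_
        intro x hx2 hxlt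
        rcases lt_or_eq_of_le (by omega : x ≤ q) with hlt | heq
        · exact hnd x hx2 hlt
        · subst heq; exact hdvd

theorem loopB_pos (n : Int) (p m : ℕ) (hp : p.Prime) (hm : 1 ≤ m) (hn : n = (p : Int) ^ m) :
    ∀ (f : Nat) (e : Int), (m : Int) ≤ e → e + 1 ≤ (m : Int) + (f : Int) →
      loopB n f e = some ((p : Int), (m : Int)) := by
  have hP2 : (2 : Int) ≤ (p : Int) := by exact_mod_cast hp.two_le
  have hn2 : 2 ≤ n := by
    rw [hn]
    calc (2 : Int) ≤ (p : Int) := hP2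
    _ ≤ (p : Int) ^ m := le_self_pow₀ (by omega) (by omega)
  intro f
  induction f with
  | zero => intro e hme hfuel; exfalso; simp at hfuel; omega
  | succ f ih =>
    intro e hme hfuel
    have he1 : 1 ≤ e := le_trans (by exact_mod_cast hm) hme
    simp only [loopB, if_pos he1]
    obtain ⟨hr1, hrle, hrlt⟩ := iroot_spec n e hn2 he1
    by_cases heq : e = (m : Int)
    · have hEm : e.toNat = m := by omega
      have hPr : ((p : Int)) ^ e.toNat = n := by rw [hEm, hn]
      have hrP : iroot n e = (p : Int) := by
        by_contra hne
        rcases lt_or_gt_of_ne hne with hlt | hgt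
        · have : n < ((p : Int)) ^ e.toNat := by
            calc n < (iroot n e + 1) ^ e.toNat := hrlt
            _ ≤ ((p : Int)) ^ e.toNat := pow_le_pow_left₀ (by omega) (by omega) _
          omega
        · have : ((p : Int)) ^ e.toNat < (iroot n e) ^ e.toNat := by
            apply pow_lt_pow_left₀ hgt (by omega)
            omega
          omega
      have hcond : (iroot n e) ^ e.toNat = n ∧ isPrime (iroot n e) = true := by
        refine ⟨by rw [hrP]; exact hPr, ?_⟩
        rw [hrP, isPrime_spec]
        refine ⟨hP2, ?_⟩
        simpa using hp
      rw [if_pos hcond, hrP, heq]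
    · have hgt : (m : Int) < e := lt_of_le_of_ne hme (fun hh => heq hh.symm)
      have hcond : ¬ ((iroot n e) ^ e.toNat = n ∧ isPrime (iroot n e) = true) := by
        intro hco
        obtain ⟨hre, -⟩ := hco
        have hr2 : 2 ≤ iroot n e := by
          by_contra hcon
          push_neg at hcon
          have h1 : iroot n e = 1 := by omega
          rw [h1, one_pow] at hre
          omega
        have hrN : ((iroot n e).toNat : Int) = iroot n e := Int.toNat_of_nonneg (by omega)
        have hreN : (iroot n e).toNat ^ e.toNat = p ^ m := by
          have h' : ((iroot n e).toNat : Int) ^ e.toNat = ((p : Int)) ^ m := by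
            rw [hrN, hre]; exact hn
          exact_mod_cast h'
        obtain ⟨k, hk1, -, hkm⟩ := pow_unique hp (by omega) (by omega) hreN
        have : e.toNat ≤ m := by
          calc e.toNat ≤ k * e.toNat := Nat.le_mul_of_pos_left _ (by omega)
          _ = m := hkm
        omega
      rw [if_neg hcond]
      exact ih (e - 1) (by omega) (by push_cast at hfuel ⊢; omega)

theorem loopB_neg (n : Int) (hn : 2 ≤ n) (h : ¬ IsPP n) :
    ∀ (f : Nat) (e : Int), loopB n f e = none := by
  intro f
  induction f with
  | zero => intro e; rfl
  | succ f ih =>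
    intro e
    simp only [loopB]
    by_cases he : 1 ≤ e
    · rw [if_pos he]
      have hcond : ¬ ((iroot n e) ^ e.toNat = n ∧ isPrime (iroot n e) = true) := by
        intro ⟨hre, hpr⟩
        obtain ⟨hr2, hprime⟩ := (isPrime_spec _).1 hpr
        have hrN : ((iroot n e).toNat : Int) = iroot n e := Int.toNat_of_nonneg (by omega)
        refine h ⟨(iroot n e).toNat, e.toNat, hprime, by omega, ?_⟩
        rw [hrN, hre]
      rw [if_neg hcond]
      exact ih (e - 1)
    · rw [if_neg he]

-- ===== VERDICT (by name: the statement is the Claim_ definition above) =====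
theorem is_prime_power_spec : Claim_equal_is_prime_power := by
  intro n _
  unfold Spec_is_prime_power
  by_cases h2 : n < 2
  · unfold is_prime_power is_prime_power_alt
    rw [if_pos h2, if_pos h2]
  · push_neg at h2
    have hnN : ((n.toNat : Int)) = n := Int.toNat_of_nonneg (by omega)
    by_cases hpp : IsPP n
    · obtain ⟨p, m, hp, hm, hn⟩ := hpp
      have hP2 : (2 : Int) ≤ (p : Int) := by exact_mod_cast hp.two_le
      have hPdvd : (p : Int) ∣ n := by rw [hn]; exact dvd_pow_self _ (by omega)
      have hPn : (p : Int) ≤ n := Int.le_of_dvd (by omega) hPdvd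
      have hA : is_prime_power n = some ((p : Int), (m : Int)) := by
        unfold is_prime_power
        rw [if_neg (by omega)]
        refine loopA_pos n p m hp hm hn _ 2 le_rfl hP2 (by intro x hx hxlt _; omega) ?_
        have : (((n - 1).toNat : Int)) = n - 1 := Int.toNat_of_nonneg (by omega)
        omega
      have hB : is_prime_power_alt n = some ((p : Int), (m : Int)) := by
        unfold is_prime_power_alt
        rw [if_neg (by omega)]
        obtain ⟨he1, hle, hlt⟩ :=
          elogGo_spec n h2 n.toNat 1 le_rfl (by simpa using h2) (by omega)
        have hEN : (((elogGo n n.toNat 1).toNat : Int)) = elogGo n n.toNat 1 :=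
          Int.toNat_of_nonneg (by omega)
        have hmE : (m : Int) ≤ elogGo n n.toNat 1 := by
          have h2m : (2 : Int) ^ m ≤ n := by
            rw [hn]; exact pow_le_pow_left₀ (by omega) hP2 m
          have hlt2 : (2 : Int) ^ m < 2 ^ (elogGo n n.toNat 1 + 1).toNat :=
            lt_of_le_of_lt h2m hlt
          have hmlt : m < (elogGo n n.toNat 1 + 1).toNat :=
            (pow_lt_pow_iff_right₀ (by norm_num : (1 : Int) < 2)).1 hlt2
          omega
        exact loopB_pos n p m hp hm hn _ _ hmE (by push_cast; omega)
      rw [hA, hB]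
    · have hA : is_prime_power n = none := by
        unfold is_prime_power
        rw [if_neg (by omega)]
        exact loopA_neg n h2 hpp _ 2 le_rfl (by intro x hx hxlt _; omega)
      have hB : is_prime_power_alt n = none := by
        unfold is_prime_power_alt
        rw [if_neg (by omega)]
        exact loopB_neg n h2 hpp _ _
      rw [hA, hB]
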